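-- pv_equiv track=rewrite | github.com/hardeepsonatype/reconcileLicenseThreatGroupsUpdates | reconcile_ltg.py | group_output_rows_by_license
-- ===== SOURCE A (Python) =====
-- from collections import Counter, defaultdict
-- from typing import Iterable
--
-- def group_output_rows_by_license(rows: Iterable[tuple[str, str]]) -> dict[str, list[str]]:
--     groups_by_license: dict[str, set[str]] = defaultdict(set)
--
--     for license_id, group_name in rows:
--         normalized_license_id = str(license_id).strip()
--         normalized_group_name = str(group_name).strip()
--         if not normalized_license_id or not normalized_group_name:
--             continue
--         groups_by_license[normalized_license_id].add(normalized_group_name)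
--
--     return {
--         license_id: sorted(group_names)
--         for license_id, group_names in groups_by_license.items()
--     }
-- ===== SOURCE B (Python) =====
-- def group_output_rows_by_license(rows):
--     # Flat pipeline: normalize+filter once, then dedup licenses in first-seen
--     # order and build each group by a per-license scan (no dict of sets).
--     kept = [(l, g) for (l, g) in ((str(a).strip(), str(b).strip()) for a, b in rows) if l and g]
--     order = list(dict.fromkeys(l for l, _ in kept))
--     return {l: sorted({g for l2, g in kept if l2 == l}) for l in order}
-- ===== Notes on version B (the rewrite author's own statement) =====
-- stated objective: alternative
-- what changed: Replaces the defaultdict-of-sets accumulator with a flat pipeline: one normalize+filter pass into a kept list, ordered key dedup via dict.fromkeys, and each license's group built by a per-license comprehension over the kept list.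
import Mathlib
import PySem

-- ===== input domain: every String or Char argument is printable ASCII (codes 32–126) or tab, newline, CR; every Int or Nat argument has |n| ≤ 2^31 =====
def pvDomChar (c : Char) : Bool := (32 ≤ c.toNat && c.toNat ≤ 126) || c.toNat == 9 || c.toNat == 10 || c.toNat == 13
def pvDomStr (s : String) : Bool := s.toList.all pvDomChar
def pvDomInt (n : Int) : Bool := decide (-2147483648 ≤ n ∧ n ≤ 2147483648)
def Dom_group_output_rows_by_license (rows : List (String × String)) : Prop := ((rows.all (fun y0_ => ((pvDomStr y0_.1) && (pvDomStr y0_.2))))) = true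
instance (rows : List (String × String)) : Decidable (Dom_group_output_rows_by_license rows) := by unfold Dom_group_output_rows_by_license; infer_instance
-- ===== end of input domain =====

-- B replaces A's defaultdict-of-sets accumulator with a flat normalize+filter
-- pass, an ordered dedup of licenses and a per-license scan (alternative decomposition).

-- ===== PORT A =====
def group_output_rows_by_license (rows : List (String × String)) : List (String × List String) :=
  let d : PySem.Dict String (PySem.Set String) :=
    rows.foldl (fun d p =>
      let nl := PySem.Str.strip p.1
      let ng := PySem.Str.strip p.2
      if nl = "" ∨ ng = "" then d
      else d.insert nl ((d.getD nl PySem.Set.empty).add ng)) PySem.Dict.empty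
  d.items.map (fun p => (p.1, PySem.List.sorted p.2 (fun x => x) false))

-- ===== PORT B =====
def group_output_rows_by_license_alt (rows : List (String × String)) : List (String × List String) :=
  let kept := (rows.map (fun p => (PySem.Str.strip p.1, PySem.Str.strip p.2))).filter
      (fun p => !(p.1 == "") && !(p.2 == ""))
  let order := PySem.List.dedup (kept.map (fun p => p.1))
  order.map (fun l =>
    (l, PySem.List.sorted (PySem.Set.ofList ((kept.filter (fun p => p.1 == l)).map (fun p => p.2)))
          (fun x => x) false))

-- ===== PRECONDITION & SPEC =====
def Spec_group_output_rows_by_license (rows : List (String × String)) (out : List (String × List String)) : Prop := out = group_output_rows_by_license_alt rows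
instance (rows : List (String × String)) (out : List (String × List String)) : Decidable (Spec_group_output_rows_by_license rows out) := by unfold Spec_group_output_rows_by_license; infer_instance

-- ===== CLAIM (what is proved, stated in full; the proofs are below) =====
def Claim_equal_group_output_rows_by_license : Prop := ∀ (rows : List (String × String)), Dom_group_output_rows_by_license rows → Spec_group_output_rows_by_license rows (group_output_rows_by_license rows)

-- ===== LEMMAS AND PROOFS =====

-- A's loop body on an already-normalized kept pair
def pvStep (d : PySem.Dict String (PySem.Set String)) (p : String × String) :
    PySem.Dict String (PySem.Set String) :=
  d.insert p.1 ((d.getD p.1 PySem.Set.empty).add p.2)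

-- A's fold over rows = pvStep folded over the normalized, filtered list
lemma pvFoldA_eq (rows : List (String × String)) (d : PySem.Dict String (PySem.Set String)) :
    rows.foldl (fun d p =>
      if PySem.Str.strip p.1 = "" ∨ PySem.Str.strip p.2 = "" then d
      else d.insert (PySem.Str.strip p.1)
        ((d.getD (PySem.Str.strip p.1) PySem.Set.empty).add (PySem.Str.strip p.2))) d
    = ((rows.map (fun p => (PySem.Str.strip p.1, PySem.Str.strip p.2))).filter
        (fun p => !(p.1 == "") && !(p.2 == ""))).foldl pvStep d := by
  induction rows generalizing d with
  | nil => rfl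
  | cons r rs ih =>
    simp only [List.foldl_cons, List.map_cons, List.filter_cons]
    by_cases h1 : PySem.Str.strip r.1 = ""
    · rw [if_pos (Or.inl h1)]
      simp only [ih]
      simp [h1]
    · by_cases h2 : PySem.Str.strip r.2 = ""
      · rw [if_pos (Or.inr h2)]
        simp only [ih]
        simp [h2]
      · rw [if_neg (by tauto), ih]
        simp [h1, h2, pvStep]

-- the items of pvStep folded over kept pairs, characterized by key order and per-key names
lemma pvLoop_items (ps : List (String × String)) (d : PySem.Dict String (PySem.Set String))
    (hnd : d.keys.Nodup) :
    (ps.foldl pvStep d).items =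
      (PySem.Set.update d.keys (ps.map (fun p => p.1))).map
        (fun l => (l, PySem.Set.update (d.getD l PySem.Set.empty)
                        ((ps.filter (fun p => p.1 == l)).map (fun p => p.2)))) := by
  induction ps generalizing d with
  | nil =>
    simp only [List.foldl_nil, List.map_nil, PySem.Set.update_nil, List.filter_nil]
    exact PySem.Dict.items_eq_map_keys d hnd PySem.Set.empty
  | cons q qs ih =>
    have hnd' : (pvStep d q).keys.Nodup := by
      unfold pvStep; exact PySem.Dict.nodup_keys_insert _ _ _ hnd
    rw [List.foldl_cons, ih _ hnd']
    have hkeys : (pvStep d q).keys = PySem.Set.add d.keys q.1 := by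
      unfold pvStep
      by_cases hc : d.contains q.1 = true
      · rw [PySem.Dict.keys_insert_of_contains _ _ hc, PySem.Set.add_of_mem]
        rwa [← PySem.Dict.contains_iff_mem_keys]
      · rw [PySem.Dict.keys_insert_of_not_contains _ _ (by simpa using hc),
          PySem.Set.add_of_not_mem]
        rw [← PySem.Dict.contains_iff_mem_keys]; simpa using hc
    rw [hkeys, ← PySem.Set.update_cons]
    simp only [List.map_cons]
    congr 1
    funext l
    by_cases hl : l = q.1
    · subst hl
      unfold pvStep
      rw [PySem.Dict.getD_insert_self]
      simp [PySem.Set.update_cons]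
    · unfold pvStep
      rw [PySem.Dict.getD_insert_of_ne _ _ _ hl]
      have : (q.1 == l) = false := by simp [Ne.symm hl]
      simp [this]

-- ===== VERDICT (by name: the statement is the Claim_ definition above) =====
theorem group_output_rows_by_license_spec : Claim_equal_group_output_rows_by_license := by
  intro rows _
  unfold Spec_group_output_rows_by_license
  simp only [group_output_rows_by_license, group_output_rows_by_license_alt]
  rw [pvFoldA_eq, pvLoop_items _ _ (by simp [PySem.Dict.keys_empty])]
  simp [PySem.Dict.getD_empty, PySem.Set.update_nil_left, PySem.Dict.keys_empty]
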